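-- pv_equiv track=rewrite | github.com/drinkwhy/wallet-strategy-bot | learning_engine.py | _flow_index
-- ===== SOURCE A (Python) =====
-- def _flow_index(flow_rows):
--     by_mint = {}
--     for row in sorted(flow_rows or [], key=lambda item: (item.get("mint") or "", item.get("created_at") or "")):
--         mint = row.get("mint")
--         if not mint:
--             continue
--         by_mint.setdefault(mint, []).append(row)
--     return by_mint
-- ===== SOURCE B (Python) =====
-- def _flow_index(flow_rows):
--     buckets = {}
--     for row in (flow_rows or []):
--         mint = row.get("mint")
--         if mint:
--             buckets.setdefault(mint, []).append(row)
--     return {m: sorted(buckets[m], key=lambda r: r.get("created_at") or "")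
--             for m in sorted(buckets)}
-- ===== Notes on version B (the rewrite author's own statement) =====
-- stated objective: alternative
-- what changed: A sorts the whole row list once by the tuple key (mint, created_at) and streams the sorted rows into a dict with setdefault/append; B never sorts the full list: it buckets rows by mint in one unsorted pass, then emits the buckets in sorted-mint order, sorting each bucket individually by created_at.
import Mathlib
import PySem

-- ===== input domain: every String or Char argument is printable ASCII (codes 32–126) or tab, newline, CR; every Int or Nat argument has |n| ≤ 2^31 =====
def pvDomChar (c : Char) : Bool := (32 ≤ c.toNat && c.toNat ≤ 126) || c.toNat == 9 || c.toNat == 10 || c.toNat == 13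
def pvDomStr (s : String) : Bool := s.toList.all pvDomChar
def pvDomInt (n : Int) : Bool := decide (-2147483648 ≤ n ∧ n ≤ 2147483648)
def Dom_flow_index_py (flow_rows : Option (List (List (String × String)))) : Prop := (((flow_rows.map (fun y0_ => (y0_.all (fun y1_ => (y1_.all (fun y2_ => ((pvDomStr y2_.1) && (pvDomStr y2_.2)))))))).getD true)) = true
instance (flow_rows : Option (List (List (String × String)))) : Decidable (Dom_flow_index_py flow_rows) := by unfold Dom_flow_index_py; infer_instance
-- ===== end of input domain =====

-- B groups rows by mint in one unsorted pass and then sorts each bucket by created_at,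
-- instead of A's single global sort by the tuple key followed by streaming grouping
-- (objective: alternative decomposition, same result).

-- row.get("mint") or "" — the truthiness test `if not mint` on an Optional[str] is `… = ""` here
def pvMint (row : List (String × String)) : String := ((PySem.Dict.mk row).get? "mint").getD ""
def pvCreated (row : List (String × String)) : String := ((PySem.Dict.mk row).get? "created_at").getD ""

-- ===== PORT A =====
-- sorted(flow_rows or [], key=lambda item: (mint or "", created_at or "")), then
-- by_mint.setdefault(mint, []).append(row)  (= Dict.modify mint [] (· ++ [row])), skipping falsy mints
def flow_index_py (flow_rows : Option (List (List (String × String)))) : List (String × List (List (String × String))) :=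
  (List.foldl
    (fun d row => if pvMint row ≠ "" then d.modify (pvMint row) [] (fun v => v ++ [row]) else d)
    PySem.Dict.empty
    (PySem.List.sorted2 (flow_rows.getD []) pvMint pvCreated false)).items

-- ===== PORT B =====
-- one unsorted bucketing pass over the rows …
def pvBuckets (rows : List (List (String × String))) : PySem.Dict String (List (List (String × String))) :=
  List.foldl
    (fun d row => if pvMint row ≠ "" then d.modify (pvMint row) [] (fun v => v ++ [row]) else d)
    PySem.Dict.empty rows

-- … then emit the buckets in sorted-mint order, each bucket sorted by created_at
def flow_index_py_alt (flow_rows : Option (List (List (String × String)))) : List (String × List (List (String × String))) :=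
  (PySem.List.sorted (pvBuckets (flow_rows.getD [])).keys (fun m => m) false).map
    (fun m => (m, PySem.List.sorted ((pvBuckets (flow_rows.getD [])).getD m []) pvCreated false))

-- ===== PRECONDITION & SPEC =====
def Spec_flow_index_py (flow_rows : Option (List (List (String × String)))) (out : List (String × List (List (String × String)))) : Prop := out = flow_index_py_alt flow_rows
instance (flow_rows : Option (List (List (String × String)))) (out : List (String × List (List (String × String)))) : Decidable (Spec_flow_index_py flow_rows out) := by unfold Spec_flow_index_py; infer_instance

-- ===== CLAIM (what is proved, stated in full; the proofs are below) =====
def Claim_equal_flow_index_py : Prop := ∀ (flow_rows : Option (List (List (String × String)))), Dom_flow_index_py flow_rows → Spec_flow_index_py flow_rows (flow_index_py flow_rows)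

-- ===== LEMMAS AND PROOFS =====

-- Python's key=lambda …: (k1, k2) tuple comparison, as sorted2 stores it
def pvLex {α : Type} (k1 k2 : α → String) (a b : α) : Bool :=
  decide (k1 a < k1 b) || (!decide (k1 b < k1 a) && decide (k2 a < k2 b))

-- single-key comparison, as sorted stores it
def pvKey {α κ : Type} [LT κ] [DecidableLT κ] (k : α → κ) (a b : α) : Bool := decide (k a < k b)

theorem pvSorted2_eq_foldl {α : Type} (xs : List α) (k1 k2 : α → String) :
    PySem.List.sorted2 xs k1 k2 false
      = xs.foldl (fun acc x => PySem.List.insertBy (pvLex k1 k2) x acc) [] := rfl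

theorem pvSorted_eq_foldl {α κ : Type} [LT κ] [DecidableLT κ] (xs : List α) (k : α → κ) :
    PySem.List.sorted xs k false
      = xs.foldl (fun acc x => PySem.List.insertBy (pvKey k) x acc) [] := rfl

-- the strict-weak-order facts about the tuple comparison that the insertion-sort lemmas need
theorem pvLex_iff {α : Type} (k1 k2 : α → String) (a b : α) :
    pvLex k1 k2 a b = true ↔ (k1 a < k1 b ∨ (¬ k1 b < k1 a ∧ k2 a < k2 b)) := by
  simp [pvLex]

theorem pvLex_not_iff {α : Type} (k1 k2 : α → String) (a b : α) :
    pvLex k1 k2 a b = false ↔ (¬ k1 a < k1 b ∧ (¬ k1 b < k1 a → ¬ k2 a < k2 b)) := by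
  rw [Bool.eq_false_iff, Ne, pvLex_iff]
  constructor
  · intro h
    exact ⟨fun h1 => h (Or.inl h1), fun h1 h2 => h (Or.inr ⟨h1, h2⟩)⟩
  · rintro ⟨h1, h2⟩ (hc | ⟨hc, hc'⟩)
    · exact h1 hc
    · exact h2 hc hc'

theorem pvLex_asym {α : Type} (k1 k2 : α → String) :
    ∀ a b, pvLex k1 k2 a b = true → pvLex k1 k2 b a = false := by
  intro a b h
  rw [pvLex_iff] at h
  rw [pvLex_not_iff]
  rcases h with h | ⟨h, h'⟩
  · exact ⟨lt_asymm h, fun hn => absurd h hn⟩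
  · exact ⟨h, fun _ => lt_asymm h'⟩

theorem pvLex_trans {α : Type} (k1 k2 : α → String) :
    ∀ a b c, pvLex k1 k2 a b = true → pvLex k1 k2 b c = true → pvLex k1 k2 a c = true := by
  intro a b c hab hbc
  rw [pvLex_iff] at *
  rcases hab with h1 | ⟨h1, h2⟩
  · rcases hbc with g1 | ⟨g1, g2⟩
    · exact Or.inl (lt_trans h1 g1)
    · exact Or.inl (lt_of_lt_of_le h1 (not_lt.mp g1))
  · rcases hbc with g1 | ⟨g1, g2⟩
    · exact Or.inl (lt_of_le_of_lt (not_lt.mp h1) g1)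
    · exact Or.inr ⟨fun hc => g1 (lt_of_lt_of_le hc (not_lt.mp h1)), lt_trans h2 g2⟩

theorem pvLex_P1 {α : Type} (k1 k2 : α → String) :
    ∀ x y z, pvLex k1 k2 x y = true → pvLex k1 k2 z y = false → pvLex k1 k2 z x = false := by
  intro x y z h1 h2
  cases hzx : pvLex k1 k2 z x with
  | false => rfl
  | true => rw [pvLex_trans k1 k2 z x y hzx h1] at h2; cases h2

theorem pvLex_P2 {α : Type} (k1 k2 : α → String) :
    ∀ x y z, pvLex k1 k2 x y = true → pvLex k1 k2 z y = false → pvLex k1 k2 x z = true := by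
  intro x y z h1 h2
  rw [pvLex_iff] at h1 ⊢
  rw [pvLex_not_iff] at h2
  obtain ⟨hzy, hor⟩ := h2
  rcases h1 with h | ⟨h, h'⟩
  · exact Or.inl (lt_of_lt_of_le h (not_lt.mp hzy))
  · by_cases hyz : k1 y < k1 z
    · exact Or.inl (lt_of_le_of_lt (not_lt.mp h) hyz)
    · have hk2 : ¬ k2 z < k2 y := hor hyz
      have h1z : ¬ k1 z < k1 x := fun hc => hzy (lt_of_lt_of_le hc (not_lt.mp h))
      exact Or.inr ⟨h1z, lt_of_lt_of_le h' (not_lt.mp hk2)⟩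

-- ---- generic insertion-sort (foldl insertBy) lemmas ----

theorem pvInsertBy_cons_of_forall {α : Type} (before : α → α → Bool) (x : α) (l : List α)
    (h : ∀ z ∈ l, before x z = true) : PySem.List.insertBy before x l = x :: l := by
  cases l with
  | nil => rfl
  | cons y ys => simp [PySem.List.insertBy, h y (by simp)]

theorem pvInsertBy_pairwise {α : Type} (before : α → α → Bool)
    (Hasym : ∀ a b, before a b = true → before b a = false)
    (P1 : ∀ x y z, before x y = true → before z y = false → before z x = false)
    (x : α) (l : List α) (hl : l.Pairwise (fun a b => before b a = false)) :
    (PySem.List.insertBy before x l).Pairwise (fun a b => before b a = false) := by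
  induction l with
  | nil => simp [PySem.List.insertBy]
  | cons y ys ih =>
    rcases List.pairwise_cons.mp hl with ⟨hy, hys⟩
    by_cases h : before x y = true
    · rw [show PySem.List.insertBy before x (y :: ys) = x :: y :: ys by
        simp [PySem.List.insertBy, h]]
      refine List.pairwise_cons.mpr ⟨?_, hl⟩
      intro z hz
      rcases List.mem_cons.mp hz with rfl | hz
      · exact Hasym x z h
      · exact P1 x y z h (hy z hz)
    · rw [show PySem.List.insertBy before x (y :: ys) = y :: PySem.List.insertBy before x ys by
        simp [PySem.List.insertBy, h]]
      refine List.pairwise_cons.mpr ⟨?_, ih hys⟩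
      intro z hz
      rcases (PySem.List.mem_insertBy before x z ys).mp hz with rfl | hz
      · exact Bool.eq_false_iff.mpr h
      · exact hy z hz

theorem pvFilter_insertBy {α : Type} (before : α → α → Bool)
    (P2 : ∀ x y z, before x y = true → before z y = false → before x z = true)
    (p : α → Bool) (x : α) (l : List α)
    (hl : l.Pairwise (fun a b => before b a = false)) :
    (PySem.List.insertBy before x l).filter p
      = if p x then PySem.List.insertBy before x (l.filter p) else l.filter p := by
  induction l with
  | nil => by_cases hx : p x <;> simp [PySem.List.insertBy, hx]
  | cons y ys ih =>
    rcases List.pairwise_cons.mp hl with ⟨hy, hys⟩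
    by_cases h : before x y = true
    · rw [show PySem.List.insertBy before x (y :: ys) = x :: y :: ys by
        simp [PySem.List.insertBy, h]]
      by_cases hx : p x
      · by_cases hpy : p y
        · rw [show (y :: ys).filter p = y :: ys.filter p by simp [hpy]]
          rw [show PySem.List.insertBy before x (y :: ys.filter p) = x :: y :: ys.filter p by
            simp [PySem.List.insertBy, h]]
          simp [hx, hpy]
        · rw [show (y :: ys).filter p = ys.filter p by simp [hpy]]
          rw [pvInsertBy_cons_of_forall before x (ys.filter p) (fun z hz =>
            P2 x y z h (hy z (List.mem_of_mem_filter hz)))]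
          simp [hx, hpy]
      · simp [List.filter_cons, hx]
    · rw [show PySem.List.insertBy before x (y :: ys) = y :: PySem.List.insertBy before x ys by
        simp [PySem.List.insertBy, h]]
      by_cases hpy : p y <;> by_cases hx : p x <;>
        simp [hpy, hx, ih hys, PySem.List.insertBy, h]

theorem pvFoldl_insertBy_pairwise {α : Type} (before : α → α → Bool)
    (Hasym : ∀ a b, before a b = true → before b a = false)
    (P1 : ∀ x y z, before x y = true → before z y = false → before z x = false)
    (l acc : List α) (hacc : acc.Pairwise (fun a b => before b a = false)) :
    (l.foldl (fun acc x => PySem.List.insertBy before x acc) acc).Pairwise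
      (fun a b => before b a = false) := by
  induction l generalizing acc with
  | nil => exact hacc
  | cons x xs ih => exact ih _ (pvInsertBy_pairwise before Hasym P1 x acc hacc)

theorem pvFilter_foldl_insertBy {α : Type} (before : α → α → Bool)
    (Hasym : ∀ a b, before a b = true → before b a = false)
    (P1 : ∀ x y z, before x y = true → before z y = false → before z x = false)
    (P2 : ∀ x y z, before x y = true → before z y = false → before x z = true)
    (p : α → Bool) (l acc : List α) (hacc : acc.Pairwise (fun a b => before b a = false)) :
    (l.foldl (fun acc x => PySem.List.insertBy before x acc) acc).filter p
      = (l.filter p).foldl (fun acc x => PySem.List.insertBy before x acc) (acc.filter p) := by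
  induction l generalizing acc with
  | nil => rfl
  | cons x xs ih =>
    simp only [List.foldl_cons, List.filter_cons]
    rw [ih _ (pvInsertBy_pairwise before Hasym P1 x acc hacc),
        pvFilter_insertBy before P2 p x acc hacc]
    by_cases hx : p x <;> simp [hx]

theorem pvInsertBy_congr {α : Type} (before before' : α → α → Bool) (x : α) (l : List α)
    (h : ∀ b ∈ l, before x b = before' x b) :
    PySem.List.insertBy before x l = PySem.List.insertBy before' x l := by
  induction l with
  | nil => rfl
  | cons y ys ih =>
    have hy : before x y = before' x y := h y (by simp)
    have hrec := ih (fun b hbm => h b (List.mem_cons_of_mem _ hbm))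
    by_cases hb : before x y = true
    · simp [PySem.List.insertBy, hb, hy ▸ hb]
    · have hb' : ¬ before' x y = true := fun hc => hb (hy ▸ hc)
      simp [PySem.List.insertBy, hb, hb', hrec]

theorem pvFoldl_insertBy_congr {α : Type} (before before' : α → α → Bool)
    (l acc : List α)
    (h : ∀ a b : α, (a ∈ l ∨ a ∈ acc) → (b ∈ l ∨ b ∈ acc) → before a b = before' a b) :
    l.foldl (fun acc x => PySem.List.insertBy before x acc) acc
      = l.foldl (fun acc x => PySem.List.insertBy before' x acc) acc := by
  induction l generalizing acc with
  | nil => rfl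
  | cons x xs ih =>
    simp only [List.foldl_cons]
    rw [pvInsertBy_congr before before' x acc
      (fun b hb => h x b (Or.inl (by simp)) (Or.inr hb))]
    apply ih
    intro a b ha hb
    apply h a b
    · rcases ha with ha | ha
      · exact Or.inl (List.mem_cons_of_mem _ ha)
      · rcases (PySem.List.mem_insertBy before' x a acc).mp ha with rfl | ha'
        · exact Or.inl (by simp)
        · exact Or.inr ha'
    · rcases hb with hb | hb
      · exact Or.inl (List.mem_cons_of_mem _ hb)
      · rcases (PySem.List.mem_insertBy before' x b acc).mp hb with rfl | hb'
        · exact Or.inl (by simp)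
        · exact Or.inr hb'

-- Set.ofList keeps a sublist of its argument (the first occurrences, in order)
theorem pvOfList_sublist {α : Type} [BEq α] (l : List α) : (PySem.Set.ofList l).Sublist l := by
  induction l using List.reverseRecOn with
  | nil => simp [PySem.Set.ofList_nil]
  | append_singleton xs x ih =>
    rw [PySem.Set.ofList_append_singleton]
    simp only [PySem.Set.add]
    split_ifs with hc
    · exact ih.trans (List.sublist_append_left xs [x])
    · exact ih.append (List.Sublist.refl [x])

-- dedup of a nondecreasing list is strictly increasing
theorem pvOfList_pairwise_lt {α : Type} [LinearOrder α] [BEq α] [LawfulBEq α] (l : List α)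
    (h : l.Pairwise (· ≤ ·)) : (PySem.Set.ofList l).Pairwise (· < ·) := by
  have hle : (PySem.Set.ofList l).Pairwise (· ≤ ·) :=
    List.Pairwise.sublist (pvOfList_sublist l) h
  have hne : (PySem.Set.ofList l).Pairwise (· ≠ ·) := PySem.Set.nodup_ofList l
  exact (hle.and hne).imp (fun hab => lt_of_le_of_ne hab.1 hab.2)

-- ---- the two programs, reduced to a common form ----

-- the guarded dict-building loop over any row list, via the filtered unguarded loop
theorem pvGuard_eq (l : List (List (String × String)))
    (d : PySem.Dict String (List (List (String × String)))) :
    l.foldl (fun d row => if pvMint row ≠ "" then d.modify (pvMint row) [] (fun v => v ++ [row]) else d) d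
      = (l.filter (fun r => decide (pvMint r ≠ ""))).foldl
          (fun d row => d.modify (pvMint row) [] (fun v => v ++ [row])) d :=
  PySem.List.foldl_ite_eq_foldl_filter (fun row => pvMint row ≠ "") _ l d

theorem pvKeys_eq (l : List (List (String × String))) :
    (l.foldl (fun d row => d.modify (pvMint row) [] (fun v => v ++ [row]))
        (PySem.Dict.empty : PySem.Dict String (List (List (String × String))))).keys
      = PySem.Set.ofList (l.map pvMint) := by
  rw [PySem.Dict.keys_foldl_modify_key l pvMint [] (fun _ row => fun v => v ++ [row])]
  rfl

theorem pvKeys_nodup (l : List (List (String × String))) :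
    (l.foldl (fun d row => d.modify (pvMint row) [] (fun v => v ++ [row]))
        (PySem.Dict.empty : PySem.Dict String (List (List (String × String))))).keys.Nodup := by
  apply PySem.Dict.nodup_keys_foldl_modify_key l pvMint [] (fun _ row => fun v => v ++ [row])
  simp [PySem.Dict.keys, PySem.Dict.empty]

theorem pvGetD_eq (l : List (List (String × String))) (m : String) :
    (l.foldl (fun d row => d.modify (pvMint row) [] (fun v => v ++ [row]))
        (PySem.Dict.empty : PySem.Dict String (List (List (String × String))))).getD m []
      = l.filter (fun r => pvMint r == m) := by
  have hmap : l.foldl (fun d row => d.modify (pvMint row) [] (fun v => v ++ [row]))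
      (PySem.Dict.empty : PySem.Dict String (List (List (String × String))))
      = (l.map (fun r => (pvMint r, r))).foldl
          (fun d p => d.modify p.1 [] (fun v => v ++ [p.2])) PySem.Dict.empty := by
    rw [List.foldl_map]
  rw [hmap, PySem.Dict.getD_foldl_modify_append]
  rw [show (PySem.Dict.empty : PySem.Dict String (List (List (String × String)))).getD m [] = []
    from rfl]
  rw [List.filter_map, List.map_map]
  simp [Function.comp_def]

-- filtering a sorted2 result is sorting the filtered list
theorem pvFilter_sorted2 (p : List (String × String) → Bool)
    (rows : List (List (String × String))) :
    (PySem.List.sorted2 rows pvMint pvCreated false).filter p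
      = PySem.List.sorted2 (rows.filter p) pvMint pvCreated false := by
  rw [pvSorted2_eq_foldl, pvSorted2_eq_foldl]
  have := pvFilter_foldl_insertBy (pvLex pvMint pvCreated)
    (pvLex_asym pvMint pvCreated) (pvLex_P1 pvMint pvCreated) (pvLex_P2 pvMint pvCreated)
    p rows [] (by simp)
  simpa using this

-- on a bucket (all mints equal) the tuple sort is the created_at sort
theorem pvBucket_sorted2 (rows : List (List (String × String))) (m : String) :
    PySem.List.sorted2 (rows.filter (fun r => pvMint r == m)) pvMint pvCreated false
      = PySem.List.sorted (rows.filter (fun r => pvMint r == m)) pvCreated false := by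
  rw [pvSorted2_eq_foldl, pvSorted_eq_foldl]
  apply pvFoldl_insertBy_congr
  intro a b ha hb
  have hma : pvMint a = m := by
    rcases ha with ha | ha
    · exact eq_of_beq (List.mem_filter.mp ha).2
    · cases ha
  have hmb : pvMint b = m := by
    rcases hb with hb | hb
    · exact eq_of_beq (List.mem_filter.mp hb).2
    · cases hb
  simp [pvLex, pvKey, hma, hmb]

-- the sorted2 result is nondecreasing in its primary key
theorem pvSorted2_mint_le (rows : List (List (String × String))) :
    (PySem.List.sorted2 rows pvMint pvCreated false).Pairwise
      (fun a b => pvMint a ≤ pvMint b) := by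
  rw [pvSorted2_eq_foldl]
  have := pvFoldl_insertBy_pairwise (pvLex pvMint pvCreated)
    (pvLex_asym pvMint pvCreated) (pvLex_P1 pvMint pvCreated) rows [] (by simp)
  refine this.imp ?_
  intro a b hab
  rw [pvLex_not_iff] at hab
  exact not_lt.mp hab.1

-- the common core: both ports equal the grouped-and-sorted canonical form
theorem pvPorts_eq (flow_rows : Option (List (List (String × String)))) :
    flow_index_py flow_rows = flow_index_py_alt flow_rows := by
  unfold flow_index_py flow_index_py_alt pvBuckets
  set rows := flow_rows.getD [] with hrows
  set pB : List (String × String) → Bool := fun r => decide (pvMint r ≠ "") with hpB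
  set T := rows.filter pB with hT
  set ST := PySem.List.sorted2 T pvMint pvCreated false with hST
  -- A's dict is the unguarded fold over ST
  have hA : (PySem.List.sorted2 rows pvMint pvCreated false).foldl
      (fun d row => if pvMint row ≠ "" then d.modify (pvMint row) [] (fun v => v ++ [row]) else d)
      PySem.Dict.empty
      = ST.foldl (fun d row => d.modify (pvMint row) [] (fun v => v ++ [row])) PySem.Dict.empty := by
    rw [pvGuard_eq, hST, hT, pvFilter_sorted2]
  -- B's dict is the unguarded fold over T
  have hB : rows.foldl
      (fun d row => if pvMint row ≠ "" then d.modify (pvMint row) [] (fun v => v ++ [row]) else d)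
      PySem.Dict.empty
      = T.foldl (fun d row => d.modify (pvMint row) [] (fun v => v ++ [row])) PySem.Dict.empty := by
    rw [pvGuard_eq, hT]
  rw [hA, hB]
  set dA := ST.foldl (fun d row => d.modify (pvMint row) [] (fun v => v ++ [row])) PySem.Dict.empty with hdA
  set dB := T.foldl (fun d row => d.modify (pvMint row) [] (fun v => v ++ [row])) PySem.Dict.empty with hdB
  set K := PySem.Set.ofList (ST.map pvMint) with hK
  set K' := PySem.Set.ofList (T.map pvMint) with hK'
  have hKA : dA.keys = K := by rw [hdA, pvKeys_eq, hK]
  have hKB : dB.keys = K' := by rw [hdB, pvKeys_eq, hK']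
  -- the sorted distinct mints of T are exactly K
  have hKlt : K.Pairwise (· < ·) := by
    rw [hK]
    exact pvOfList_pairwise_lt _ (List.pairwise_map.mpr (pvSorted2_mint_le T))
  have hPerm : K.Perm K' := by
    rw [(List.perm_ext_iff_of_nodup (PySem.Set.nodup_ofList _) (PySem.Set.nodup_ofList _))]
    intro a
    simp only [PySem.Set.mem_ofList, List.mem_map]
    constructor
    · rintro ⟨r, hr, rfl⟩
      exact ⟨r, (PySem.List.sorted2_perm T pvMint pvCreated false).mem_iff.mp hr, rfl⟩
    · rintro ⟨r, hr, rfl⟩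
      exact ⟨r, (PySem.List.sorted2_perm T pvMint pvCreated false).mem_iff.mpr hr, rfl⟩
  have hE1 : PySem.List.sorted K' (fun m => m) false = K :=
    PySem.List.sorted_eq_of_perm_of_pairwise_lt K' K (fun m => m) hPerm hKlt
  -- items of A's dict
  have hItems : dA.items = K.map (fun m => (m, dA.getD m [])) := by
    rw [← hKA]
    exact PySem.Dict.items_eq_map_keys dA (hKA ▸ (hKA ▸ (by rw [hdA]; exact pvKeys_nodup ST))) []
  rw [hItems, hKB, hE1]
  apply List.map_congr_left
  intro m _
  have hbA : dA.getD m [] = ST.filter (fun r => pvMint r == m) := by rw [hdA, pvGetD_eq]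
  have hbB : dB.getD m [] = T.filter (fun r => pvMint r == m) := by rw [hdB, pvGetD_eq]
  rw [hbA, hbB, hST, pvFilter_sorted2, pvBucket_sorted2]

-- ===== VERDICT (by name: the statement is the Claim_ definition above) =====
theorem flow_index_py_spec : Claim_equal_flow_index_py := by
  intro flow_rows _
  exact pvPorts_eq flow_rows
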